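-- pv_equiv track=rewrite | github.com/ChongyeWang/AI | Planning/planning_least_stops.py | remaining_place
-- ===== SOURCE A (Python) =====
-- def remaining_place(curr_place, w1, w2, w3, w4, w5):
--     """
--     This method check the number of remaining types
--     of components.
--     """
--     dict = {}
--     list = [w1,w2, w3, w4, w5]
--     for w in list:
--         for char in w:
--             if char not in dict:
--                 dict[char] = 0
--             dict[char] += 1
--     if curr_place in dict:
--         return len(dict) - 1
--     else:
--         return len(dict)
-- ===== SOURCE B (Python) =====
-- def remaining_place(curr_place, w1, w2, w3, w4, w5):
--     """Sort all characters of the five words, then count run heads of the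
--     sorted sequence (equal characters are adjacent after sorting), skipping
--     the run whose character equals curr_place."""
--     chars = sorted(w1 + w2 + w3 + w4 + w5)
--     count = 0
--     prev = None
--     for c in chars:
--         if c != prev:
--             if c != curr_place:
--                 count += 1
--             prev = c
--     return count
-- ===== Notes on version B (the rewrite author's own statement) =====
-- stated objective: alternative
-- what changed: Replace the count dict plus post-hoc membership test and subtraction by sort-then-scan: concatenate the words, sort the characters so duplicates become adjacent, and count run heads while skipping the run equal to curr_place.
import Mathlib
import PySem

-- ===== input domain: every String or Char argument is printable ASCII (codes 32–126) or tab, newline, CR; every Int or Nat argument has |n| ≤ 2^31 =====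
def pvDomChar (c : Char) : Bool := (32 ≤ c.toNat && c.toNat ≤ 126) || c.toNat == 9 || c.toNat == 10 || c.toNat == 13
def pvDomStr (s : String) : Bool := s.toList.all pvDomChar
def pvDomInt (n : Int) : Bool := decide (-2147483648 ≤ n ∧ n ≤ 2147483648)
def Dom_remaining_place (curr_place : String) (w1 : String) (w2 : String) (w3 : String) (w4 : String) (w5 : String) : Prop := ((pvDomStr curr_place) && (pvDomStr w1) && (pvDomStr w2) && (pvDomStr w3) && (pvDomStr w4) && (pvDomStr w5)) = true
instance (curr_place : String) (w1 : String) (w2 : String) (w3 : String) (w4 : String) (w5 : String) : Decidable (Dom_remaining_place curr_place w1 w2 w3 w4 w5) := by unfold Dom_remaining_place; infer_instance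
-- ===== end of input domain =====

-- B replaces A's count dict + post-hoc membership test by a different algorithm:
-- sort all characters so duplicates are adjacent, then count run heads while
-- skipping the run equal to curr_place (objective: alternative).

-- ===== PORT A =====
-- body of A's inner loop: 'if char not in dict: dict[char] = 0; dict[char] += 1'
-- (Python dict keys are the 1-char strings, so the key is String.singleton char)
def pvStepA (d : PySem.Dict String Int) (c : Char) : PySem.Dict String Int :=
  let key := String.singleton c
  let d1 := if d.contains key then d else d.insert key 0
  d1.insert key (d1.getD key 0 + 1)

def remaining_place (curr_place : String) (w1 : String) (w2 : String) (w3 : String) (w4 : String) (w5 : String) : Int :=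
  let list := [w1, w2, w3, w4, w5]
  let d := list.foldl (fun d w => w.toList.foldl pvStepA d) PySem.Dict.empty
  if d.contains curr_place then (d.size : Int) - 1 else (d.size : Int)

-- ===== PORT B =====
-- loop body of Source B: 'if c != prev: (if c != curr_place: count += 1); prev = c'
-- (state = (count, prev); prev is None before the first iteration)
def pvStepB (cp : String) (st : Int × Option Char) (c : Char) : Int × Option Char :=
  if some c ≠ st.2 then
    ((if String.singleton c ≠ cp then st.1 + 1 else st.1), some c)
  else st

def remaining_place_alt (curr_place : String) (w1 : String) (w2 : String) (w3 : String) (w4 : String) (w5 : String) : Int :=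
  -- chars = sorted(w1 + w2 + w3 + w4 + w5): Python compares 1-char strings, i.e. by code point
  let chars := PySem.List.sorted (w1.toList ++ w2.toList ++ w3.toList ++ w4.toList ++ w5.toList) (fun c => c.toNat) false
  (chars.foldl (pvStepB curr_place) (0, none)).1

-- ===== PRECONDITION & SPEC =====
def Spec_remaining_place (curr_place : String) (w1 : String) (w2 : String) (w3 : String) (w4 : String) (w5 : String) (out : Int) : Prop := out = remaining_place_alt curr_place w1 w2 w3 w4 w5
instance (curr_place : String) (w1 : String) (w2 : String) (w3 : String) (w4 : String) (w5 : String) (out : Int) : Decidable (Spec_remaining_place curr_place w1 w2 w3 w4 w5 out) := by unfold Spec_remaining_place; infer_instance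

-- ===== CLAIM (what is proved, stated in full; the proofs are below) =====
def Claim_equal_remaining_place : Prop := ∀ (curr_place : String) (w1 : String) (w2 : String) (w3 : String) (w4 : String) (w5 : String), Dom_remaining_place curr_place w1 w2 w3 w4 w5 → Spec_remaining_place curr_place w1 w2 w3 w4 w5 (remaining_place curr_place w1 w2 w3 w4 w5)

-- ===== LEMMAS AND PROOFS =====

theorem singleton_injective : Function.Injective String.singleton := by
  intro a b h
  have : (String.singleton a).toList = (String.singleton b).toList := by rw [h]
  simpa [String.singleton] using this

-- ---------- A side: the dict's keys are the distinct 1-char strings ----------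

theorem keys_pvStepA (d : PySem.Dict String Int) (c : Char) :
    (pvStepA d c).keys = PySem.Set.add d.keys (String.singleton c) := by
  unfold pvStepA
  by_cases h : d.contains (String.singleton c) = true
  · have hmem : String.singleton c ∈ d.keys := (PySem.Dict.contains_iff_mem_keys d _).1 h
    simp [h, PySem.Dict.keys_insert_of_contains d _ h, PySem.Set.add, PySem.Set.contains, hmem]
  · have hmem : String.singleton c ∉ d.keys := fun hm => h ((PySem.Dict.contains_iff_mem_keys d _).2 hm)
    have h2 : (d.insert (String.singleton c) 0).contains (String.singleton c) = true :=
      PySem.Dict.contains_insert_self d _ 0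
    simp [h, PySem.Dict.keys_insert_of_contains _ _ h2,
      PySem.Dict.keys_insert_of_not_contains d _ (by simpa using h),
      PySem.Set.add, PySem.Set.contains, hmem]

theorem keysA_chars (l : List Char) (d : PySem.Dict String Int) :
    ((l.foldl pvStepA d).keys) = PySem.Set.update d.keys (l.map String.singleton) := by
  induction l generalizing d with
  | nil => simp [PySem.Set.update]
  | cons c t ih => simp [PySem.Set.update, List.foldl_cons, ih, keys_pvStepA]

theorem keysA_words (ws : List String) (d : PySem.Dict String Int) :
    ((ws.foldl (fun d w => w.toList.foldl pvStepA d) d).keys)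
      = PySem.Set.update d.keys ((ws.flatMap String.toList).map String.singleton) := by
  induction ws generalizing d with
  | nil => simp [PySem.Set.update]
  | cons w t ih => simp [List.foldl_cons, ih, keysA_chars, PySem.Set.update, List.foldl_append]

-- ---------- counting helper: filter over an insert, as a card equation ----------

theorem card_filter_insert (T : Finset Char) (c : Char) (R Q : Char → Prop)
    [DecidablePred R] [DecidablePred Q] (hRc : R c) (hRT : ∀ x ∈ T, R x) :
    ((insert c T).filter (fun x => R x ∧ Q x)).card
      = (if Q c then 1 else 0) + (T.filter (fun x => x ≠ c ∧ Q x)).card := by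
  by_cases hQ : Q c
  · have hfe : (insert c T).filter (fun x => R x ∧ Q x)
        = insert c (T.filter (fun x => x ≠ c ∧ Q x)) := by
      ext x
      simp only [Finset.mem_filter, Finset.mem_insert]
      constructor
      · rintro ⟨hx | hx, _, hq⟩
        · exact Or.inl hx
        · by_cases hxc : x = c
          · exact Or.inl hxc
          · exact Or.inr ⟨hx, hxc, hq⟩
      · rintro (rfl | ⟨hx, _, hq⟩)
        · exact ⟨Or.inl rfl, hRc, hQ⟩
        · exact ⟨Or.inr hx, hRT x hx, hq⟩
    rw [hfe, Finset.card_insert_of_notMem (by simp), if_pos hQ]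
    omega
  · have hfe : (insert c T).filter (fun x => R x ∧ Q x)
        = T.filter (fun x => x ≠ c ∧ Q x) := by
      ext x
      simp only [Finset.mem_filter, Finset.mem_insert]
      constructor
      · rintro ⟨hx | hx, _, hq⟩
        · exact absurd (hx ▸ hq) hQ
        · exact ⟨hx, fun hxc => hQ (hxc ▸ hq), hq⟩
      · rintro ⟨hx, _, hq⟩
        exact ⟨Or.inr hx, hRT x hx, hq⟩
    rw [hfe, if_neg hQ]
    omega

-- ---------- B side: the run-head scan of a sorted list counts distinct chars ----------

theorem char_toNat_inj {a b : Char} (h : a.toNat = b.toNat) : a = b := by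
  apply Char.ext
  exact UInt32.toNat_inj.1 h

theorem scanB_some (cp : String) (l : List Char)
    (hl : l.Pairwise (fun a b => a.toNat ≤ b.toNat)) (p : Char)
    (hp : ∀ x ∈ l, p.toNat ≤ x.toNat) (acc : Int) :
    (l.foldl (pvStepB cp) (acc, some p)).1
      = acc + ((l.toFinset.filter (fun c => c ≠ p ∧ String.singleton c ≠ cp)).card : Int) := by
  induction l generalizing p acc with
  | nil => simp
  | cons c t ih =>
    rw [List.pairwise_cons] at hl
    obtain ⟨hct, ht⟩ := hl
    by_cases hcp : c = p
    · subst hcp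
      rw [List.foldl_cons]
      have hstep : pvStepB cp (acc, some c) c = (acc, some c) := by
        simp [pvStepB]
      rw [hstep, ih ht c hct acc]
      have hfe : ((c :: t).toFinset.filter (fun x => x ≠ c ∧ String.singleton x ≠ cp))
          = (t.toFinset.filter (fun x => x ≠ c ∧ String.singleton x ≠ cp)) := by
        simp [List.toFinset_cons, Finset.filter_insert]
      rw [hfe]
    · have hpc : p.toNat < c.toNat := by
        have h1 : p.toNat ≤ c.toNat := hp c List.mem_cons_self
        rcases Nat.lt_or_ge p.toNat c.toNat with h | h
        · exact h
        · exact absurd (char_toNat_inj (Nat.le_antisymm h h1)) hcp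
      have hne_t : ∀ x ∈ t.toFinset, x ≠ p := by
        intro x hx hxp
        have h1 : c.toNat ≤ x.toNat := hct x (List.mem_toFinset.1 hx)
        subst hxp
        omega
      rw [List.foldl_cons]
      have hstep : pvStepB cp (acc, some p) c
          = ((if String.singleton c ≠ cp then acc + 1 else acc), some c) := by
        simp [pvStepB, hcp]
      rw [hstep, ih ht c hct _]
      have hcard : ((insert c t.toFinset).filter (fun x => x ≠ p ∧ String.singleton x ≠ cp)).card
          = (if String.singleton c ≠ cp then 1 else 0)
            + (t.toFinset.filter (fun x => x ≠ c ∧ String.singleton x ≠ cp)).card :=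
        card_filter_insert t.toFinset c (fun x => x ≠ p) (fun x => String.singleton x ≠ cp) hcp hne_t
      rw [List.toFinset_cons, hcard]
      by_cases hq : String.singleton c ≠ cp
      · rw [if_pos hq, if_pos hq]
        push_cast
        omega
      · rw [if_neg hq, if_neg hq]
        push_cast
        omega

theorem scanB_none (cp : String) (l : List Char)
    (hl : l.Pairwise (fun a b => a.toNat ≤ b.toNat)) :
    (l.foldl (pvStepB cp) (0, none)).1
      = ((l.toFinset.filter (fun c => String.singleton c ≠ cp)).card : Int) := by
  cases l with
  | nil => simp
  | cons c t =>
    rw [List.pairwise_cons] at hl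
    obtain ⟨hct, ht⟩ := hl
    rw [List.foldl_cons]
    have hstep : pvStepB cp ((0 : Int), none) c
        = ((if String.singleton c ≠ cp then (1 : Int) else 0), some c) := by
      simp [pvStepB]
    rw [hstep, scanB_some cp t ht c hct _]
    have hcard : ((insert c t.toFinset).filter (fun x => True ∧ String.singleton x ≠ cp)).card
        = (if String.singleton c ≠ cp then 1 else 0)
          + (t.toFinset.filter (fun x => x ≠ c ∧ String.singleton x ≠ cp)).card :=
      card_filter_insert t.toFinset c (fun _ => True) (fun x => String.singleton x ≠ cp) trivial (fun x _ => trivial)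
    have hfe : ((c :: t).toFinset.filter (fun x => String.singleton x ≠ cp))
        = ((insert c t.toFinset).filter (fun x => True ∧ String.singleton x ≠ cp)) := by
      simp
    rw [hfe, hcard]
    by_cases hq : String.singleton c ≠ cp
    · rw [if_pos hq, if_pos hq]
      push_cast
      omega
    · rw [if_neg hq, if_neg hq]
      push_cast
      omega

-- ---------- the bridge: A's dedup-count-with-decrement = B's filtered distinct count ----------

theorem bridge (cp : String) (L : List Char) :
    (if cp ∈ PySem.Set.ofList (L.map String.singleton)
       then ((PySem.Set.ofList (L.map String.singleton)).length : Int) - 1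
       else ((PySem.Set.ofList (L.map String.singleton)).length : Int))
    = ((L.toFinset.filter (fun c => String.singleton c ≠ cp)).card : Int) := by
  have hnd : (PySem.Set.ofList (L.map String.singleton)).Nodup := PySem.Set.nodup_ofList _
  have hlen : (PySem.Set.ofList (L.map String.singleton)).length
      = (L.map String.singleton).toFinset.card := by
    rw [← List.toFinset_card_of_nodup hnd]
    congr 1
    ext x
    simp [PySem.Set.mem_ofList]
  have himg : (L.map String.singleton).toFinset = L.toFinset.image String.singleton := by
    ext x
    simp [List.mem_toFinset]
  have hcardimg : (L.map String.singleton).toFinset.card = L.toFinset.card := by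
    rw [himg]
    exact Finset.card_image_of_injective _ singleton_injective
  have hsplit := Finset.card_filter_add_card_filter_not
    (s := L.toFinset) (p := fun c => String.singleton c = cp)
  have hmem : (cp ∈ PySem.Set.ofList (L.map String.singleton))
      ↔ ∃ c ∈ L.toFinset, String.singleton c = cp := by
    simp [PySem.Set.mem_ofList, List.mem_toFinset, eq_comm]
  by_cases hm : ∃ c ∈ L.toFinset, String.singleton c = cp
  · obtain ⟨c0, hc0, hs0⟩ := hm
    have hone : (L.toFinset.filter (fun c => String.singleton c = cp)) = {c0} := by
      ext x
      simp only [Finset.mem_filter, Finset.mem_singleton]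
      constructor
      · rintro ⟨_, hx⟩
        exact singleton_injective (hx.trans hs0.symm)
      · rintro rfl
        exact ⟨hc0, hs0⟩
    rw [if_pos (hmem.2 ⟨c0, hc0, hs0⟩), hlen, hcardimg]
    rw [hone] at hsplit
    simp only [Finset.card_singleton] at hsplit
    have : (L.toFinset.filter (fun c => ¬ String.singleton c = cp)).card
        = L.toFinset.card - 1 := by omega
    have hpos : 1 ≤ L.toFinset.card := by
      have := Finset.card_pos.2 ⟨c0, hc0⟩
      omega
    simp only [ne_eq]
    push_cast [this]
    omega
  · have hzero : (L.toFinset.filter (fun c => String.singleton c = cp)) = ∅ := by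
      ext x
      simp only [Finset.mem_filter, Finset.notMem_empty, iff_false]
      rintro ⟨hx, hs⟩
      exact hm ⟨x, hx, hs⟩
    rw [if_neg (fun h => hm (hmem.1 h)), hlen, hcardimg]
    rw [hzero] at hsplit
    simp only [Finset.card_empty, Nat.zero_add] at hsplit
    simp only [ne_eq]
    omega

-- ---------- assembly ----------

theorem remaining_place_spec : Claim_equal_remaining_place := by
  unfold Claim_equal_remaining_place
  intro cp w1 w2 w3 w4 w5 _
  unfold Spec_remaining_place remaining_place remaining_place_alt
  dsimp only
  have hkeys := keysA_words [w1, w2, w3, w4, w5] PySem.Dict.empty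
  set L := w1.toList ++ w2.toList ++ w3.toList ++ w4.toList ++ w5.toList with hLdef
  have hLflat : ([w1, w2, w3, w4, w5].flatMap String.toList) = L := by
    simp [hLdef]
  rw [hLflat] at hkeys
  have hsz : ∀ d : PySem.Dict String Int, d.size = d.keys.length := by
    intro d; simp [PySem.Dict.size, PySem.Dict.keys]
  have hcont := PySem.Dict.contains_eq_decide_mem_keys
    (d := [w1, w2, w3, w4, w5].foldl (fun d w => w.toList.foldl pvStepA d) PySem.Dict.empty)
    (k := cp)
  -- A's value
  rw [hcont, hsz, hkeys]
  have hupd : PySem.Set.update (PySem.Dict.empty : PySem.Dict String Int).keys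
      (L.map String.singleton) = PySem.Set.ofList (L.map String.singleton) := rfl
  rw [hupd]
  -- B's value
  have hsorted := PySem.List.sorted_pairwise (xs := L) (key := fun c : Char => c.toNat)
  have hperm : (PySem.List.sorted L (fun c : Char => c.toNat) false).Perm L :=
    PySem.List.sorted_perm _ _ _
  have hB := scanB_none cp (PySem.List.sorted L (fun c : Char => c.toNat) false) hsorted
  rw [hB, (List.toFinset_eq_of_perm _ _ hperm)]
  -- the bridge
  rw [← bridge cp L]
  by_cases hm : cp ∈ PySem.Set.ofList (L.map String.singleton) <;> simp [hm]
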